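-- pv_equiv track=rewrite | github.com/DeepakBadarinath/Value_Interpretable_Dynamic_Treatment_Regimes | Datastructures/disjoint_box_union.py | generate_k_tuples
-- ===== SOURCE A (Python) =====
-- import itertools
-- import itertools
--
-- def generate_k_tuples(array_list, k):
--     '''
--     Given a list of lists, return all possible k-tuples from the list of lists,
--     and also return the indices.
--
--     Parameters:
--     -----------------------------------------------------------------------
--     lists : list[list]
--             The list of lists we wish to sample from
--     k : int
--         The number of elements we want to look at in the tuples
--
--     Returns:
--     -----------------------------------------------------------------------
--     results : tuple
--               The tuple which denotes the values and the indices we wish to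
--               sample from
--
--     '''
--     # Step 3: Generate all possible combinations of indices of size k
--     index_combinations = list(itertools.combinations(range(len(array_list)), k))
--
--     # Step 4: Generate all possible k-tuples for each combination
--     all_k_tuples = []
--     for indices in index_combinations:
--         # Extract the sub-arrays corresponding to the current combination of indices
--         sub_arrays = []
--         for i in indices:
--             cart_arr = itertools.product(array_list[i], repeat = 2)
--             unequal_tuples = [tup for tup in cart_arr if tup[0]<tup[1]]
--             sub_arrays.append(unequal_tuples)
--
--         # Generate all possible k-tuples from the sub-arrays
--         k_tuples = list(itertools.product(*sub_arrays))
--         # Store the results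
--         all_k_tuples.append((indices, k_tuples))
--
--
--     return all_k_tuples
-- ===== SOURCE B (Python) =====
-- def generate_k_tuples(array_list, k):
--     # Recursive backtracking: build each (indices, k_tuples) pair directly, fusing
--     # combination choice and product construction into one recursion; no itertools.
--     n = len(array_list)
--     if k < 0:
--         raise ValueError("k must be non-negative")
--
--     def pairs(arr):
--         return [(a, b) for a in arr for b in arr if a < b]
--
--     def rec(start, m):
--         # all (indices, tuples) with indices ⊆ [start, n) of size m, lexicographic
--         if m == 0:
--             return [((), [()])]
--         res = []
--         for i in range(start, n - m + 1):
--             p = pairs(array_list[i])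
--             for idx, tups in rec(i + 1, m - 1):
--                 res.append(((i,) + idx, [(x,) + t for x in p for t in tups]))
--         return res
--
--     return rec(0, k)
-- ===== Notes on version B (the rewrite author's own statement) =====
-- stated objective: alternative
-- what changed: B drops itertools entirely and uses one recursive backtracking function that, choosing each index in turn, builds every (indices, k_tuples) pair directly — combination enumeration and cartesian-product construction fused into a single recursion — instead of A's staged itertools.combinations then per-combination itertools.product.
import Mathlib
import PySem

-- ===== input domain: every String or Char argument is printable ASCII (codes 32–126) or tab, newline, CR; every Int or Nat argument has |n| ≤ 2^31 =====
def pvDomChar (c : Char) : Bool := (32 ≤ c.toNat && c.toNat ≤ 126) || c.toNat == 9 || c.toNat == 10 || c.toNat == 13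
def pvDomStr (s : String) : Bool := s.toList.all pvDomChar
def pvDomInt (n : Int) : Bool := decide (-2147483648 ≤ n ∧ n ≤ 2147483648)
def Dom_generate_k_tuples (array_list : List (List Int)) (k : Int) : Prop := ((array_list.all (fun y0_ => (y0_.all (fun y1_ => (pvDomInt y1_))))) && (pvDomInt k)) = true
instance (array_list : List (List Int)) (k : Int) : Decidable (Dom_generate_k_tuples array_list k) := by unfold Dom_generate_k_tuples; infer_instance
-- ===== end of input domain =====

-- ===== PORT A =====
-- B replaces A's itertools.combinations + itertools.product enumeration by one recursive
-- backtracking function that builds each (indices, k_tuples) pair directly (objective: alternative).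

-- itertools.combinations(l, k) in lexicographic order (hand-ported; exact for distinct-element source lists such as range(n))
def pvCombs (l : List Int) (k : Nat) : List (List Int) :=
  match k, l with
  | 0, _ => [[]]
  | _ + 1, [] => []
  | k + 1, x :: xs => (pvCombs xs k).map (fun c => x :: c) ++ pvCombs xs (k + 1)

-- itertools.product(*lists): first list varies slowest (exact)
def pvProd {α : Type} (ls : List (List α)) : List (List α) :=
  match ls with
  | [] => [[]]
  | l :: rest => l.flatMap (fun x => (pvProd rest).map (fun t => x :: t))

-- A: [tup for tup in itertools.product(arr, repeat=2) if tup[0] < tup[1]]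
def pvUnequalA (arr : List Int) : List (Int × Int) :=
  ((arr.flatMap (fun a => arr.map (fun b => (a, b)))).filter (fun t => t.1 < t.2))

-- for k < 0 Python raises ValueError (outside Pre_); k.toNat is arbitrary there
def generate_k_tuples (array_list : List (List Int)) (k : Int) : List (List Int × (List (List (Int × Int)))) :=
  let index_combinations := pvCombs ((List.range array_list.length).map Int.ofNat) k.toNat
  index_combinations.foldl (fun all_k_tuples indices =>
    let sub_arrays := indices.foldl (fun sub_arrays i =>
      sub_arrays ++ [pvUnequalA (PySem.List.pyGetD array_list i [])]) []  -- i always in range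
    all_k_tuples ++ [(indices, pvProd sub_arrays)]) []

-- ===== PORT B =====
-- B: [(a, b) for a in arr for b in arr if a < b]
def pvPairsB (arr : List Int) : List (Int × Int) :=
  arr.flatMap (fun a => arr.filterMap (fun b => if a < b then some (a, b) else none))

-- B's rec(start, m): combination choice and product construction fused into one recursion
def pvRecB (al : List (List Int)) (n : Int) (m : Nat) (start : Int) :
    List (List Int × (List (List (Int × Int)))) :=
  match m with
  | 0 => [([], [[]])]
  | m' + 1 =>
    (PySem.List.pyRange start (n - ((m' : Int) + 1) + 1) 1).foldl (fun res i =>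
      let p := pvPairsB (PySem.List.pyGetD al i [])
      (pvRecB al n m' (i + 1)).foldl (fun res pr =>
        res ++ [(i :: pr.1, p.flatMap (fun x => pr.2.map (fun t => x :: t)))]) res) []

-- for k < 0 Python B raises ValueError (outside Pre_); k.toNat is arbitrary there
def generate_k_tuples_alt (array_list : List (List Int)) (k : Int) : List (List Int × (List (List (Int × Int)))) :=
  pvRecB array_list (array_list.length : Int) k.toNat 0

-- ===== PRECONDITION & SPEC =====
-- Pre_ excludes k < 0, on which Python A raises ValueError (B raises too).
def Pre_generate_k_tuples (array_list : List (List Int)) (k : Int) : Prop := 0 ≤ k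
instance (array_list : List (List Int)) (k : Int) : Decidable (Pre_generate_k_tuples array_list k) := by unfold Pre_generate_k_tuples; infer_instance
def pvWitness_generate_k_tuples : List (List Int) × Int := ([[1, 2, 2], [3]], 1)

def Spec_generate_k_tuples (array_list : List (List Int)) (k : Int) (out : List (List Int × (List (List (Int × Int))))) : Prop := out = generate_k_tuples_alt array_list k
instance (array_list : List (List Int)) (k : Int) (out : List (List Int × (List (List (Int × Int))))) : Decidable (Spec_generate_k_tuples array_list k out) := by unfold Spec_generate_k_tuples; infer_instance

-- ===== CLAIM (what is proved, stated in full; the proofs are below) =====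
def Claim_equal_generate_k_tuples : Prop := ∀ (array_list : List (List Int)) (k : Int), Dom_generate_k_tuples array_list k → Pre_generate_k_tuples array_list k → Spec_generate_k_tuples array_list k (generate_k_tuples array_list k)

-- ===== LEMMAS AND PROOFS =====

-- A's filtered square equals B's nested comprehension
theorem pvUnequal_row (a : Int) (arr : List Int) :
    (arr.map (fun b => (a, b))).filter (fun t => t.1 < t.2)
      = arr.filterMap (fun b => if a < b then some (a, b) else none) := by
  induction arr with
  | nil => rfl
  | cons b bs ih =>
    simp only [List.map_cons, List.filter_cons, List.filterMap_cons, ih]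
    by_cases h : a < b
    · simp [h]
    · simp [h]

theorem pvUnequal_eq (arr : List Int) : pvUnequalA arr = pvPairsB arr := by
  unfold pvUnequalA pvPairsB
  rw [List.filter_flatMap]
  exact List.flatMap_congr (fun a _ => pvUnequal_row a arr)

theorem pvCombs_nil_of_short (l : List Int) (k : Nat) (h : l.length < k) :
    pvCombs l k = [] := by
  induction l generalizing k with
  | nil => cases k with
    | zero => omega
    | succ k' => rfl
  | cons x xs ih =>
    cases k with
    | zero => omega
    | succ k' =>
      simp only [List.length_cons] at h
      rw [pvCombs, ih k' (by omega), ih (k' + 1) (by omega)]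
      rfl

-- lexicographic unrolling of combinations over an integer interval
theorem pvCombs_unroll (m : Nat) (s n : Int) :
    pvCombs (PySem.List.pyRange s n 1) (m + 1)
      = (PySem.List.pyRange s (n - (m : Int)) 1).flatMap
          (fun i => (pvCombs (PySem.List.pyRange (i + 1) n 1) m).map (fun c => i :: c)) := by
  by_cases hn : n ≤ s
  · rw [PySem.List.pyRange_one_eq_nil hn, PySem.List.pyRange_one_eq_nil (by omega)]
    rfl
  · have hn' : s < n := by omega
    rw [PySem.List.pyRange_one_cons hn']
    by_cases hm : s < n - (m : Int)
    · rw [PySem.List.pyRange_one_cons hm, List.flatMap_cons,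
        pvCombs, pvCombs_unroll m (s + 1) n]
    · have hm' : n - (m : Int) ≤ s := by omega
      rw [PySem.List.pyRange_one_eq_nil hm']
      have hlen : (PySem.List.pyRange (s + 1) n 1).length = (n - (s + 1)).toNat :=
        PySem.List.length_pyRange_one _ _
      rw [pvCombs, pvCombs_nil_of_short _ m (by omega),
        pvCombs_nil_of_short _ (m + 1) (by omega)]
      rfl
termination_by (n - s).toNat
decreasing_by omega

-- pvRecB computes, for each combination, the pair (indices, product of its pair lists)
theorem pvRecB_eq (al : List (List Int)) (n : Int) (m : Nat) (s : Int) :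
    pvRecB al n m s
      = (pvCombs (PySem.List.pyRange s n 1) m).map
          (fun c => (c, pvProd (c.map (fun i => pvPairsB (PySem.List.pyGetD al i []))))) := by
  induction m generalizing s with
  | zero => simp [pvRecB, pvCombs, pvProd]
  | succ m' ih =>
    rw [pvRecB]
    have harg : n - ((m' : Int) + 1) + 1 = n - (m' : Int) := by ring
    rw [harg, pvCombs_unroll m' s n]
    simp only [ih, PySem.List.foldl_append_singleton_eq_map,
      PySem.List.foldl_append_eq_flatMap, List.nil_append, List.map_flatMap,
      List.map_map]
    simp [Function.comp_def, pvProd]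

theorem generate_k_tuples_spec : Claim_equal_generate_k_tuples := by
  intro array_list k _ _
  unfold Spec_generate_k_tuples generate_k_tuples generate_k_tuples_alt
  rw [pvRecB_eq]
  have hr : (List.range array_list.length).map Int.ofNat
      = PySem.List.pyRange 0 (array_list.length : Int) 1 := by
    rw [PySem.List.pyRange_one]
    simp
  rw [hr]
  simp only [PySem.List.foldl_append_singleton_eq_map, List.nil_append]
  apply List.map_congr_left
  intro indices _
  simp only [pvUnequal_eq]
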